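-- pv_equiv track=rewrite | github.com/ctfloyd/advent-of-code-2019 | day4/day4_clean.py | check_for_runs
-- ===== SOURCE A (Python) =====
-- def check_for_runs(candidate_as_string : str, do_part1 : bool) -> bool:
--     run_length = []
--     current_run = 1
--     for i in range(len(candidate_as_string) - 1):
--         if candidate_as_string[i] == candidate_as_string[i + 1]:
--             current_run += 1
--         else:
--             run_length.append(current_run)
--             current_run = 1
--
--     # Append the last run
--     run_length.append(current_run)
--     if do_part1:
--         return True if len(set([2, 3, 4, 5, 6]) & set(run_length)) > 0 else False
--     else:
--         return 2 in run_length
-- ===== SOURCE B (Python) =====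
-- def check_for_runs(candidate_as_string: str, do_part1: bool) -> bool:
--     s = candidate_as_string
--     n = len(s)
--     if do_part1:
--         # intended part1 rule: some two adjacent characters are equal
--         return any(s[i] == s[i + 1] for i in range(n - 1))
--     # part2: some maximal run has length exactly 2; skip run by run, early exit
--     i = 0
--     while i < n:
--         j = i + 1
--         while j < n and s[j] == s[i]:
--             j += 1
--         if j - i == 2:
--             return True
--         i = j
--     return False
-- ===== Notes on version B (the rewrite author's own statement) =====
-- stated objective: simpler
-- what changed: B drops A's run-length list and set intersection: part1 is a direct any() over adjacent pairs, part2 is an early-exit two-pointer scan that skips run by run and tests for a run of length exactly 2.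
-- intended difference: On strings whose every maximal run of equal characters has length 1 or at least 7 but which contain at least one adjacent equal pair (with do_part1 true), A returns False because its hard-coded set {2,3,4,5,6} misses longer runs, while B returns True, the intended 'has an adjacent double' rule of AoC day 4 part 1. — e.g. on check_for_runs("aaaaaaa", true): A returns false, B returns true
import Mathlib
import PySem

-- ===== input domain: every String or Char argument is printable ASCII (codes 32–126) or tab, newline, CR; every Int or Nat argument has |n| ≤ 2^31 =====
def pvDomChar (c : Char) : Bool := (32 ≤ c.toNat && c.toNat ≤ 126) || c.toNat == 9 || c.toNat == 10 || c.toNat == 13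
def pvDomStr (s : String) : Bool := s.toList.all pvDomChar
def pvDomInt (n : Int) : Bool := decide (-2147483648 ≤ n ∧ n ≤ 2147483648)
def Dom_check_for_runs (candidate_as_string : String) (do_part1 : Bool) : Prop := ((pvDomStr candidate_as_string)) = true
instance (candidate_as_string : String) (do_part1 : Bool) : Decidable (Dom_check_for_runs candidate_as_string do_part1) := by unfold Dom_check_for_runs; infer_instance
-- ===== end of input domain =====

-- B replaces A's run-length list + set intersection by a direct adjacent-pair any (part1)
-- and an early-exit run-skipping two-pointer scan (part2); on part1 B fixes A's hard-coded
-- {2..6} set, which wrongly returns False for strings whose only runs are of length ≥ 7 (see D_).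

-- ===== PORT A =====
-- A's loop over range(len(s)-1) building (run_length, current_run), then append, then the two tests.
def check_for_runs (candidate_as_string : String) (do_part1 : Bool) : Bool :=
  let l := candidate_as_string.toList
  let st := (PySem.List.pyRange 0 ((l.length : Int) - 1) 1).foldl
    (fun (st : List Int × Int) i =>
      if PySem.List.pyGetD l i ' ' == PySem.List.pyGetD l (i + 1) ' '
      then (st.1, st.2 + 1)
      else (st.1 ++ [st.2], 1)) ([], 1)
  let run_length := st.1 ++ [st.2]
  if do_part1 then
    decide (0 < PySem.Set.len (PySem.Set.inter (PySem.Set.ofList ([2, 3, 4, 5, 6] : List Int)) (PySem.Set.ofList run_length)))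
  else
    run_length.contains 2

-- ===== PORT B =====
-- inner while loop: advance j while j < n and l[j] == c
def pvRunEnd (l : List Char) (c : Char) (j : Nat) : Nat :=
  if j < l.length ∧ l.getD j ' ' == c then pvRunEnd l c (j + 1) else j
termination_by l.length - j
decreasing_by omega

theorem pvRunEnd_gt (l : List Char) (c : Char) (j : Nat) : j ≤ pvRunEnd l c j := by
  have H : ∀ n j, l.length - j ≤ n → j ≤ pvRunEnd l c j := by
    intro n
    induction n with
    | zero =>
      intro j hj; rw [pvRunEnd]; split
      · next h => exact absurd h.1 (by omega)
      · exact Nat.le_refl j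
    | succ n ih =>
      intro j hj; rw [pvRunEnd]; split
      · next h => have := ih (j + 1) (by omega); omega
      · exact Nat.le_refl j
  exact H l.length j (by omega)

-- outer while loop: run by run, early return on a run of length exactly 2
def pvScan2 (l : List Char) (i : Nat) : Bool :=
  if h : i < l.length then
    let j := pvRunEnd l (l.getD i ' ') (i + 1)
    if j - i = 2 then true else pvScan2 l j
  else false
termination_by l.length - i
decreasing_by have := pvRunEnd_gt l (l.getD i ' ') (i + 1); omega

def check_for_runs_alt (candidate_as_string : String) (do_part1 : Bool) : Bool :=
  let l := candidate_as_string.toList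
  if do_part1 then
    (PySem.List.pyRange 0 ((l.length : Int) - 1) 1).any
      (fun i => PySem.List.pyGetD l i ' ' == PySem.List.pyGetD l (i + 1) ' ')
  else
    pvScan2 l 0

-- ===== PRECONDITION & SPEC =====
-- spec helper for D_: lengths of the maximal runs of equal characters (structural recursion;
-- not either port's code)
def pvRuns : List Char → List Nat
  | [] => []
  | a :: t => if t.head? == some a then (pvRuns t).modifyHead (· + 1) else 1 :: pvRuns t

-- On strings that contain an adjacent equal pair but whose every maximal run has length 1 or ≥ 7,
-- with do_part1 = true, A returns False (its hard-coded set {2..6} misses longer runs) while B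
-- returns True, the intended 'has an adjacent double' rule.
def D_check_for_runs (candidate_as_string : String) (do_part1 : Bool) : Prop :=
  do_part1 = true ∧ (∃ r ∈ pvRuns candidate_as_string.toList, 2 ≤ r) ∧
    ∀ r ∈ pvRuns candidate_as_string.toList, r < 2 ∨ 6 < r
instance (candidate_as_string : String) (do_part1 : Bool) : Decidable (D_check_for_runs candidate_as_string do_part1) := by
  unfold D_check_for_runs; infer_instance

def Spec_check_for_runs (candidate_as_string : String) (do_part1 : Bool) (out : Bool) : Prop :=
  ¬ D_check_for_runs candidate_as_string do_part1 → out = check_for_runs_alt candidate_as_string do_part1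
instance (candidate_as_string : String) (do_part1 : Bool) (out : Bool) : Decidable (Spec_check_for_runs candidate_as_string do_part1 out) := by
  unfold Spec_check_for_runs; infer_instance

def pvDiffWitness_check_for_runs : String × Bool := ("aaaaaaa", true)
def pvDiffWitnessOut_check_for_runs : Bool × Bool := (false, true)

-- ===== CLAIM (what is proved, stated in full; the proofs are below) =====
def Claim_unchanged_check_for_runs : Prop := ∀ (candidate_as_string : String) (do_part1 : Bool), Dom_check_for_runs candidate_as_string do_part1 → Spec_check_for_runs candidate_as_string do_part1 (check_for_runs candidate_as_string do_part1)
def Claim_changed_check_for_runs : Prop := Dom_check_for_runs (pvDiffWitness_check_for_runs.1) (pvDiffWitness_check_for_runs.2) ∧ D_check_for_runs (pvDiffWitness_check_for_runs.1) (pvDiffWitness_check_for_runs.2) ∧ check_for_runs (pvDiffWitness_check_for_runs.1) (pvDiffWitness_check_for_runs.2) = pvDiffWitnessOut_check_for_runs.1 ∧ check_for_runs_alt (pvDiffWitness_check_for_runs.1) (pvDiffWitness_check_for_runs.2) = pvDiffWitnessOut_check_for_runs.2 ∧ pvDiffWitnessOut_check_for_runs.1 ≠ pvDiffWitnessOut_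check_for_runs.2
def Claim_exact_check_for_runs : Prop := ∀ (candidate_as_string : String) (do_part1 : Bool), Dom_check_for_runs candidate_as_string do_part1 → D_check_for_runs candidate_as_string do_part1 → check_for_runs candidate_as_string do_part1 ≠ check_for_runs_alt candidate_as_string do_part1

-- ===== LEMMAS AND PROOFS =====

-- run-length decomposition seeded with the current run count (spec for A's fold, over Int)
def pvRunsFrom (c : Char) (m : Int) : List Char → List Int
  | [] => [m]
  | b :: t => if c == b then pvRunsFrom b (m + 1) t else m :: pvRunsFrom b 1 t

def pvRunsTail : List Char → List Int
  | [] => []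
  | b :: t => pvRunsFrom b 1 t

def pvAdj : List Char → Bool
  | [] => false
  | [_] => false
  | a :: b :: t => (a == b) || pvAdj (b :: t)

-- ---- generic reductions: pyRange folds/anys over Int indices to Nat-range ones ----
theorem pv_foldl_pyRange {α : Type} (n : Nat) (f : α → Int → α) (a : α) :
    (PySem.List.pyRange 0 ((n : Int) - 1) 1).foldl f a
      = (List.range (n - 1)).foldl (fun x (k : Nat) => f x (k : Int)) a := by
  rw [PySem.List.pyRange_one]
  have h : (((n : Int) - 1) - 0).toNat = n - 1 := by omega
  rw [h, List.foldl_map]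
  simp only [zero_add]

theorem pv_any_pyRange (n : Nat) (p : Int → Bool) :
    (PySem.List.pyRange 0 ((n : Int) - 1) 1).any p
      = (List.range (n - 1)).any (fun (k : Nat) => p (k : Int)) := by
  rw [PySem.List.pyRange_one]
  have h : (((n : Int) - 1) - 0).toNat = n - 1 := by omega
  rw [h, List.any_map]
  simp only [Function.comp_def, zero_add]

theorem pv_getD_window (l : List Char) (k : Nat) :
    PySem.List.pyGetD l ((k : Int) + 1) ' ' = l.getD (k + 1) ' ' := by
  have : ((k : Int) + 1) = ((k + 1 : Nat) : Int) := by push_cast; ring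
  rw [this, PySem.List.pyGetD_natCast]

-- window fold over range (len-1): peel the first index
theorem pv_window_foldl {α : Type} (g : Char → Char → α → α) (a b : Char) (t : List Char) (st : α) :
    (List.range ((a :: b :: t).length - 1)).foldl
        (fun st k => g ((a :: b :: t).getD k ' ') ((a :: b :: t).getD (k + 1) ' ') st) st
      = (List.range ((b :: t).length - 1)).foldl
        (fun st k => g ((b :: t).getD k ' ') ((b :: t).getD (k + 1) ' ') st) (g a b st) := by
  have h1 : (a :: b :: t).length - 1 = ((b :: t).length - 1) + 1 := by simp
  rw [h1, List.range_succ_eq_map, List.foldl_cons, List.foldl_map]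
  simp [Function.comp_def, List.getD, List.getElem?_cons_succ, List.getElem?_cons_zero]

theorem pv_window_any (p : Char → Char → Bool) (a b : Char) (t : List Char) :
    (List.range ((a :: b :: t).length - 1)).any
        (fun k => p ((a :: b :: t).getD k ' ') ((a :: b :: t).getD (k + 1) ' '))
      = (p a b || (List.range ((b :: t).length - 1)).any
        (fun k => p ((b :: t).getD k ' ') ((b :: t).getD (k + 1) ' '))) := by
  have h1 : (a :: b :: t).length - 1 = ((b :: t).length - 1) + 1 := by simp
  rw [h1, List.range_succ_eq_map, List.any_cons, List.any_map]
  simp [Function.comp_def, List.getD, List.getElem?_cons_succ, List.getElem?_cons_zero]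

-- ---- A's fold computes pvRunsFrom ----
def pvAstep (x y : Char) (st : List Int × Int) : List Int × Int :=
  if x == y then (st.1, st.2 + 1) else (st.1 ++ [st.2], 1)

theorem pv_fold_runs (t : List Char) : ∀ (c : Char) (rl : List Int) (cur : Int),
    (let r := (List.range ((c :: t).length - 1)).foldl
        (fun st k => pvAstep ((c :: t).getD k ' ') ((c :: t).getD (k + 1) ' ') st) (rl, cur);
      r.1 ++ [r.2]) = rl ++ pvRunsFrom c cur t := by
  induction t with
  | nil => intro c rl cur; simp [pvRunsFrom]
  | cons b t ih =>
    intro c rl cur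
    rw [pv_window_foldl]
    by_cases h : c = b
    · subst h
      have := ih c rl (cur + 1)
      simpa [pvAstep, pvRunsFrom] using this
    · have := ih b (rl ++ [cur]) 1
      simp only [pvAstep, beq_iff_eq, if_neg h] at *
      simp only [pvRunsFrom, beq_iff_eq, if_neg h]
      rw [this]
      simp

-- A's run_length list
def pvAruns (l : List Char) : List Int :=
  match l with
  | [] => [1]
  | c :: t => pvRunsFrom c 1 t

theorem pv_A_eq (s : String) (p : Bool) :
    check_for_runs s p =
      (if p then (pvAruns s.toList).any (fun r => decide (2 ≤ r) && decide (r ≤ 6))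
        else (pvAruns s.toList).contains 2) := by
  have hfold : ∀ l : List Char,
      ((((PySem.List.pyRange 0 ((l.length : Int) - 1) 1).foldl
          (fun (st : List Int × Int) i =>
            if PySem.List.pyGetD l i ' ' == PySem.List.pyGetD l (i + 1) ' '
            then (st.1, st.2 + 1) else (st.1 ++ [st.2], 1)) ([], 1)).1) ++
        [(((PySem.List.pyRange 0 ((l.length : Int) - 1) 1).foldl
          (fun (st : List Int × Int) i =>
            if PySem.List.pyGetD l i ' ' == PySem.List.pyGetD l (i + 1) ' '
            then (st.1, st.2 + 1) else (st.1 ++ [st.2], 1)) ([], 1)).2)]) = pvAruns l := by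
    intro l
    rw [pv_foldl_pyRange]
    simp only [pv_getD_window, PySem.List.pyGetD_natCast]
    cases l with
    | nil => simp [pvAruns]
    | cons c t =>
      have := pv_fold_runs t c [] 1
      simp only [pvAstep] at this
      simpa [pvAruns] using this
  have hset : ∀ R : List Int,
      decide (0 < PySem.Set.len (PySem.Set.inter (PySem.Set.ofList ([2, 3, 4, 5, 6] : List Int)) (PySem.Set.ofList R)))
        = R.any (fun r => decide (2 ≤ r) && decide (r ≤ 6)) := by
    intro R
    have h1 : (0 < PySem.Set.len (PySem.Set.inter (PySem.Set.ofList ([2, 3, 4, 5, 6] : List Int)) (PySem.Set.ofList R)))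
        ↔ ∃ x : Int, x ∈ PySem.Set.inter (PySem.Set.ofList ([2, 3, 4, 5, 6] : List Int)) (PySem.Set.ofList R) := by
      have hlen : PySem.Set.len (PySem.Set.inter (PySem.Set.ofList ([2, 3, 4, 5, 6] : List Int)) (PySem.Set.ofList R))
          = ((PySem.Set.inter (PySem.Set.ofList ([2, 3, 4, 5, 6] : List Int)) (PySem.Set.ofList R)).length : Int) := rfl
      rw [hlen]
      constructor
      · intro h
        rcases List.exists_mem_of_length_pos (by exact_mod_cast h) with ⟨x, hx⟩
        exact ⟨x, hx⟩
      · intro ⟨x, hx⟩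
        exact_mod_cast List.length_pos_of_mem hx
    cases hb : R.any (fun r => decide (2 ≤ r) && decide (r ≤ 6)) with
    | false =>
      rw [List.any_eq_false] at hb
      simp only [decide_eq_false_iff_not, h1]
      rintro ⟨x, hx⟩
      rw [PySem.Set.mem_inter] at hx
      rcases hx with ⟨hx1, hx2⟩
      rw [PySem.Set.mem_ofList] at hx1 hx2
      have := hb x hx2
      fin_cases hx1 <;> simp_all
    | true =>
      rw [List.any_eq_true] at hb
      rcases hb with ⟨r, hr, hcond⟩
      simp only [Bool.and_eq_true, decide_eq_true_eq] at hcond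
      simp only [decide_eq_true_eq, h1]
      refine ⟨r, ?_⟩
      rw [PySem.Set.mem_inter, PySem.Set.mem_ofList, PySem.Set.mem_ofList]
      refine ⟨?_, hr⟩
      have h2 := hcond.1; have h6 := hcond.2
      interval_cases r <;> simp
  simp only [check_for_runs]
  rw [hfold, hset]

-- ---- B's part1 any is pvAdj ----
theorem pv_adj_window (l : List Char) :
    (List.range (l.length - 1)).any (fun k => l.getD k ' ' == l.getD (k + 1) ' ') = pvAdj l := by
  induction l using pvAdj.induct with
  | case1 => simp [pvAdj]
  | case2 a => simp [pvAdj]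
  | case3 a b t ih => rw [pv_window_any, ih]; simp [pvAdj]

theorem pv_B_eq (s : String) (p : Bool) :
    check_for_runs_alt s p =
      (if p then pvAdj s.toList else pvScan2 s.toList 0) := by
  unfold check_for_runs_alt
  cases p
  · simp
  · simp only [if_true]
    rw [pv_any_pyRange]
    simp only [pv_getD_window, PySem.List.pyGetD_natCast]
    exact pv_adj_window s.toList

-- ---- run decomposition via takeWhile/dropWhile ----
theorem pv_runsFrom_decomp (t : List Char) : ∀ (c : Char) (m : Int),
    pvRunsFrom c m t
      = (m + ((t.takeWhile (· == c)).length : Int)) :: pvRunsTail (t.dropWhile (· == c)) := by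
  induction t with
  | nil => intro c m; simp [pvRunsFrom, pvRunsTail]
  | cons b t ih =>
    intro c m
    by_cases h : c = b
    · subst h
      simp only [pvRunsFrom, beq_self_eq_true, if_pos]
      rw [ih c (m + 1)]
      simp only [List.takeWhile_cons, beq_self_eq_true, if_pos, List.dropWhile_cons]
      simp only [List.length_cons]
      congr 1
      push_cast; ring
    · have hb : (b == c) = false := by simp [beq_iff_eq]; exact fun hh => h hh.symm
      simp only [pvRunsFrom, beq_iff_eq, if_neg h, List.takeWhile_cons, hb,
        List.dropWhile_cons, Bool.false_eq_true, if_false, List.length_nil,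
        Int.natCast_zero, add_zero, pvRunsTail]

theorem pv_dropWhile_eq_drop {p : Char → Bool} (t : List Char) :
    t.dropWhile p = t.drop (t.takeWhile p).length := by
  induction t with
  | nil => simp
  | cons a t ih => by_cases h : p a <;> simp [List.dropWhile_cons, List.takeWhile_cons, h, ih]

-- ---- pvAdj in terms of runs ----
theorem pv_adj_runs_aux : ∀ (n : Nat) (l : List Char), l.length ≤ n →
    pvAdj l = (pvRunsTail l).any (fun r => decide (2 ≤ r)) := by
  intro n
  induction n with
  | zero => intro l hl; rw [List.length_eq_zero_iff.mp (Nat.le_zero.mp hl)]; simp [pvAdj, pvRunsTail]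
  | succ n ih =>
    intro l hl
    match l with
    | [] => simp [pvAdj, pvRunsTail]
    | c :: t =>
      rw [pvRunsTail, pv_runsFrom_decomp]
      match t with
      | [] => simp [pvAdj, pvRunsTail]
      | b :: t' =>
        by_cases h : c = b
        · subst h
          simp only [pvAdj, beq_self_eq_true, Bool.true_or, List.takeWhile_cons, List.dropWhile_cons,
            if_pos, List.any_cons, Bool.true_eq, Bool.or_eq_true, List.any_eq_true,
            decide_eq_true_eq]
          left
          simp only [List.length_cons]
          push_cast
          omega
        · have hb : (b == c) = false := by simp [beq_iff_eq]; exact fun hh => h hh.symm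
          simp only [pvAdj, List.takeWhile_cons, hb, Bool.false_eq_true, if_false,
            List.dropWhile_cons, List.length_nil, Int.natCast_zero, add_zero, List.any_cons]
          have h2 : (decide (2 ≤ (1 : Int))) = false := by decide
          rw [h2, Bool.false_or, ← ih (b :: t') (by simp at hl ⊢; omega)]
          simp [pvAdj, beq_iff_eq, h]

theorem pv_adj_runs (l : List Char) :
    pvAdj l = (pvRunsTail l).any (fun r => decide (2 ≤ r)) :=
  pv_adj_runs_aux l.length l (Nat.le_refl _)

-- ---- pvRunEnd / pvScan2 in terms of runs ----
theorem pv_runEnd_eq (l : List Char) (c : Char) : ∀ (n j : Nat), l.length - j ≤ n →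
    pvRunEnd l c j = j + ((l.drop j).takeWhile (· == c)).length := by
  intro n
  induction n with
  | zero =>
    intro j hj
    rw [pvRunEnd]
    have hd : l.drop j = [] := List.drop_eq_nil_of_le (by omega)
    rw [hd]
    have : ¬ (j < l.length ∧ l.getD j ' ' == c) := by
      rintro ⟨h1, _⟩; omega
    rw [if_neg this]; simp
  | succ n ih =>
    intro j hj
    rw [pvRunEnd]
    by_cases h1 : j < l.length
    · have hd : l.drop j = l[j] :: l.drop (j + 1) := List.drop_eq_getElem_cons h1
      have hg : l.getD j ' ' = l[j] := List.getD_eq_getElem l ' ' h1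
      by_cases h2 : l[j] = c
      · have : (j < l.length ∧ l.getD j ' ' == c) := ⟨h1, by rw [hg]; exact beq_iff_eq.mpr h2⟩
        rw [if_pos this, ih (j + 1) (by omega), hd]
        simp only [List.takeWhile_cons, beq_iff_eq, h2, decide_true, if_pos, List.length_cons]
        omega
      · have : ¬ (j < l.length ∧ l.getD j ' ' == c) := by
          rintro ⟨_, hh⟩; rw [hg] at hh; exact h2 (beq_iff_eq.mp hh)
        rw [if_neg this, hd]
        simp only [List.takeWhile_cons, beq_iff_eq, h2, decide_false, Bool.false_eq_true,
          if_false, List.length_nil, Nat.add_zero]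
    · have hd : l.drop j = [] := List.drop_eq_nil_of_le (by omega)
      have : ¬ (j < l.length ∧ l.getD j ' ' == c) := by rintro ⟨hh, _⟩; omega
      rw [if_neg this, hd]; simp

theorem pv_scan2_eq (l : List Char) : ∀ (n i : Nat), l.length - i ≤ n →
    pvScan2 l i = (pvRunsTail (l.drop i)).contains 2 := by
  intro n
  induction n with
  | zero =>
    intro i hi
    rw [pvScan2, dif_neg (by omega : ¬ i < l.length)]
    rw [List.drop_eq_nil_of_le (by omega)]
    simp [pvRunsTail]
  | succ n ih =>
    intro i hi
    by_cases h1 : i < l.length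
    · have hg : l.getD i ' ' = l[i] := List.getD_eq_getElem l ' ' h1
      have hd : l.drop i = l[i] :: l.drop (i + 1) := List.drop_eq_getElem_cons h1
      obtain ⟨k, hk⟩ : ∃ k, ((l.drop (i + 1)).takeWhile (· == l[i])).length = k := ⟨_, rfl⟩
      have hre : pvRunEnd l (l.getD i ' ') (i + 1) = (i + 1) + k := by
        rw [hg, pv_runEnd_eq l l[i] l.length (i + 1) (by omega), hk]
      have hruns : pvRunsTail (l.drop i) = (1 + (k : Int)) :: pvRunsTail ((l.drop (i + 1)).dropWhile (· == l[i])) := by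
        rw [hd, pvRunsTail, pv_runsFrom_decomp, hk]
      have hdropj : l.drop ((i + 1) + k) = (l.drop (i + 1)).dropWhile (· == l[i]) := by
        rw [pv_dropWhile_eq_drop, hk, List.drop_drop]
      rw [pvScan2, dif_pos h1, hre, hruns]
      dsimp only
      by_cases h2 : k = 1
      · rw [if_pos (by omega)]
        have hb : ((2 : Int) == 1 + (k : Int)) = true := by
          rw [beq_iff_eq]; omega
        rw [List.contains_cons, hb, Bool.true_or]
      · rw [if_neg (by omega)]
        have hlen : ((l.drop (i + 1)).takeWhile (· == l[i])).length ≤ (l.drop (i + 1)).length :=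
          (List.takeWhile_sublist _).length_le
        have hdlen : (l.drop (i + 1)).length = l.length - (i + 1) := List.length_drop
        have hih := ih ((i + 1) + k) (by omega)
        rw [hih, hdropj]
        have hb : ((2 : Int) == 1 + (k : Int)) = false := by
          rw [beq_eq_false_iff_ne]
          omega
        rw [List.contains_cons, hb, Bool.false_or]
    · rw [pvScan2, dif_neg h1]
      rw [List.drop_eq_nil_of_le (by omega)]
      simp [pvRunsTail]

-- run lists of nonempty strings are A's run list
theorem pv_aruns_eq (l : List Char) (h : l ≠ []) : pvAruns l = pvRunsTail l := by
  match l with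
  | c :: t => rfl

theorem pv_adj_nil_ne (l : List Char) (h : pvAdj l = true) : l ≠ [] := by
  intro he; subst he; simp [pvAdj] at h

-- no adjacent pair implies no run of length in [2,6]
theorem pv_noadj_noshort (l : List Char) (h : pvAdj l = false) :
    (pvRunsTail l).any (fun r => decide (2 ≤ r) && decide (r ≤ 6)) = false := by
  rw [pv_adj_runs] at h
  simp only [List.any_eq_false] at h ⊢
  intro r hr
  have := h r hr
  simp_all

-- ---- bridge between the Int run list (pvRunsTail) and D_'s Nat run list (pvRuns) ----
theorem pv_runs_ne (b : Char) (t : List Char) : pvRuns (b :: t) ≠ [] := by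
  induction t generalizing b with
  | nil => simp [pvRuns]
  | cons c t' ih =>
    rw [pvRuns]
    split
    · cases h : pvRuns (c :: t') with
      | nil => exact absurd h (ih c)
      | cons r rs => simp [h]
    · simp

theorem pv_runs_cons (b : Char) (t : List Char) :
    pvRuns (b :: t) = (pvRuns (b :: t)).headI :: (pvRuns (b :: t)).tail := by
  match h : pvRuns (b :: t) with
  | [] => exact absurd h (pv_runs_ne b t)
  | r :: rs => simp

theorem pv_runsFrom_runs (t : List Char) : ∀ (c : Char) (m : Int),
    pvRunsFrom c m t
      = (m + ((pvRuns (c :: t)).headI : Int) - 1) :: (pvRuns (c :: t)).tail.map (fun (n : Nat) => (n : Int)) := by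
  induction t with
  | nil =>
    intro c m
    simp [pvRunsFrom, pvRuns]
  | cons b t' ih =>
    intro c m
    by_cases h : c = b
    · subst h
      simp only [pvRunsFrom, beq_self_eq_true, if_pos]
      rw [ih c (m + 1)]
      conv_rhs => rw [pvRuns]
      simp only [List.head?_cons, beq_self_eq_true, if_pos]
      conv_rhs => rw [pv_runs_cons c t']
      simp only [List.modifyHead_cons, List.headI_cons, List.tail_cons]
      congr 1
      push_cast
      ring
    · have hbeqc : (c == b) = false := beq_eq_false_iff_ne.mpr h
      have hbeq : ((some b : Option Char) == some c) = false := by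
        rw [beq_eq_false_iff_ne]
        intro hh
        exact h (Option.some.inj hh).symm
      simp only [pvRunsFrom, hbeqc, Bool.false_eq_true, if_false]
      rw [ih b 1]
      conv_rhs => rw [pvRuns]
      simp only [List.head?_cons, hbeq, Bool.false_eq_true, if_false, List.headI_cons, List.tail_cons]
      conv_rhs => rw [pv_runs_cons b t']
      simp only [List.map_cons]
      congr 1
      · push_cast; ring
      · congr 1
        push_cast; ring

theorem pv_runs_eq (l : List Char) :
    pvRunsTail l = (pvRuns l).map (fun (n : Nat) => (n : Int)) := by
  match l with
  | [] => rfl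
  | c :: t =>
    rw [pvRunsTail, pv_runsFrom_runs]
    conv_rhs => rw [pv_runs_cons c t]
    simp only [List.map_cons]
    congr 1
    push_cast
    ring

theorem pv_adj_runsN (l : List Char) :
    pvAdj l = (pvRuns l).any (fun r => decide (2 ≤ r)) := by
  rw [pv_adj_runs, pv_runs_eq, List.any_map]
  simp [Function.comp_def]

theorem pv_short_runsN (l : List Char) :
    (pvRunsTail l).any (fun r => decide (2 ≤ r) && decide (r ≤ 6))
      = (pvRuns l).any (fun r => decide (2 ≤ r) && decide (r ≤ 6)) := by
  rw [pv_runs_eq, List.any_map]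
  simp [Function.comp_def]

theorem check_for_runs_spec : Claim_unchanged_check_for_runs := by
  unfold Claim_unchanged_check_for_runs
  intro s p _ hnD
  rw [pv_A_eq, pv_B_eq]
  cases p with
  | false =>
    simp only [if_false, Bool.false_eq_true]
    rw [pv_scan2_eq s.toList s.toList.length 0 (by omega), List.drop_zero]
    cases hl : s.toList with
    | nil => simp [pvAruns, pvRunsTail]
    | cons c t => rw [pv_aruns_eq _ (by simp [hl])]
  | true =>
    simp only [if_true]
    cases ha : pvAdj s.toList with
    | false =>
      have hshortf := pv_noadj_noshort s.toList ha
      cases hl : s.toList with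
      | nil => simp [pvAruns, pvRunsTail]
      | cons c t =>
        rw [pv_aruns_eq _ (by simp [hl])]
        rw [hl] at hshortf
        exact hshortf
    | true =>
      have hne : s.toList ≠ [] := pv_adj_nil_ne _ ha
      rw [pv_aruns_eq _ hne]
      cases hb : (pvRunsTail s.toList).any (fun r => decide (2 ≤ r) && decide (r ≤ 6)) with
      | true => rfl
      | false =>
        exfalso
        apply hnD
        refine ⟨rfl, ?_, ?_⟩
        · have hAN := pv_adj_runsN s.toList
          rw [ha] at hAN
          rcases List.any_eq_true.mp hAN.symm with ⟨r, hr, hd⟩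
          exact ⟨r, hr, by simpa using hd⟩
        · have hb' : (pvRuns s.toList).any (fun r => decide (2 ≤ r) && decide (r ≤ 6)) = false := by
            rw [← pv_short_runsN, hb]
          intro r hr
          have hthis := List.any_eq_false.mp hb' r hr
          by_cases h2 : 2 ≤ r
          · have h6 : ¬ r ≤ 6 := fun h6 => hthis (by simp [h2, h6])
            right; omega
          · left; omega

theorem check_for_runs_changed : Claim_changed_check_for_runs := by unfold Claim_changed_check_for_runs; decide

theorem check_for_runs_tight : Claim_exact_check_for_runs := by
  unfold Claim_exact_check_for_runs
  intro s p _ hD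
  unfold D_check_for_runs at hD
  rcases hD with ⟨hp, hAdjE, hAll⟩
  subst hp
  have ha : pvAdj s.toList = true := by
    rw [pv_adj_runsN]
    rcases hAdjE with ⟨r, hr, h2⟩
    exact List.any_eq_true.mpr ⟨r, hr, by simpa using h2⟩
  have hne : s.toList ≠ [] := pv_adj_nil_ne _ ha
  have hshort : (pvRunsTail s.toList).any (fun r => decide (2 ≤ r) && decide (r ≤ 6)) = false := by
    rw [pv_short_runsN]
    apply List.any_eq_false.mpr
    intro r hr
    rcases hAll r hr with h | h
    · have h2 : ¬ 2 ≤ r := by omega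
      simp [h2]
    · have h6 : ¬ r ≤ 6 := by omega
      simp [h6]
  rw [pv_A_eq, pv_B_eq]
  simp only [if_true]
  rw [pv_aruns_eq _ hne, hshort, ha]
  simp
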